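-- pv_equiv track=rewrite | github.com/weakenleg2/mappo_again | algorithms/mappo/runner/separated/walker_runner_hdpo.py | normalize_indices
-- ===== SOURCE A (Python) =====
-- def normalize_indices(cluster_indices):
--     normalized_indices = []
--     for indices in cluster_indices:
--         # Track the unique labels encountered in order and their normalized mappings
--         unique_labels = {}
--         next_label = 0
--         normalized = []
--
--         for index in indices:
--             if index not in unique_labels:
--                 # Encounter a new label, assign it the next available normalized label
--                 unique_labels[index] = next_label
--                 next_label += 1
--
--             # Map the original label to the normalized label
--             normalized_label = unique_labels[index]
--             normalized.append(normalized_label)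
--
--         normalized_indices.append(normalized)
--
--     return normalized_indices
-- ===== SOURCE B (Python) =====
-- def normalize_indices(cluster_indices):
--     # Closed form, no label table: the canonical label of x is the number of
--     # distinct values occurring strictly before x's first occurrence.
--     return [[len(set(indices[:indices.index(x)])) for x in indices]
--             for indices in cluster_indices]
-- ===== Notes on version B (the rewrite author's own statement) =====
-- stated objective: alternative
-- what changed: Drops A's label dictionary and running counter entirely: B computes each label by a closed form, len(set(prefix before the element's first occurrence)), using index() and a prefix set per element instead of any incremental table.
import Mathlib
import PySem

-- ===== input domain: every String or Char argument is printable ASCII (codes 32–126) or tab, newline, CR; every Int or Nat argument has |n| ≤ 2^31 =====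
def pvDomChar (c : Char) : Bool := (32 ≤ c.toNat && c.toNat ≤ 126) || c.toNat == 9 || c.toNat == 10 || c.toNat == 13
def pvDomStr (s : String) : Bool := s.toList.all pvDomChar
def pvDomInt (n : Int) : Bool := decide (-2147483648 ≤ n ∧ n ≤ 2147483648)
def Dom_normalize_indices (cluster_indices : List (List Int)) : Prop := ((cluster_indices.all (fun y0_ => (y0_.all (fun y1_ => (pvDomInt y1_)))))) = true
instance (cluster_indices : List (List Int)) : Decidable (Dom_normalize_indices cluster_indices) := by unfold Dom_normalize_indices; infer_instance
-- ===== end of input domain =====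

-- B drops A's incremental label dictionary and counter: each label is computed by the closed
-- form len(set(indices[:indices.index(x)])) (distinct values before the first occurrence);
-- alternative decomposition, equivalence proved for all inputs.

-- ===== PORT A =====
-- inner for-loop body of A: state = (unique_labels, next_label, normalized)
def stepA (st : PySem.Dict Int Int × Int × List Int) (index : Int) : PySem.Dict Int Int × Int × List Int :=
  let st' :=
    if st.1.contains index then st
    else (st.1.insert index st.2.1, st.2.1 + 1, st.2.2)
  -- unique_labels[index] never raises here (the key was just ensured present); getD 0 is exact
  (st'.1, st'.2.1, st'.2.2 ++ [st'.1.getD index 0])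

def normA_inner (indices : List Int) : List Int :=
  (indices.foldl stepA ((PySem.Dict.empty : PySem.Dict Int Int), (0 : Int), ([] : List Int))).2.2

def normalize_indices (cluster_indices : List (List Int)) : List (List Int) :=
  cluster_indices.foldl (fun acc indices => acc ++ [normA_inner indices]) []

-- ===== PORT B =====
-- len(set(indices[:indices.index(x)])); indices.index(x) never raises (x drawn from indices),
-- so .getD 0 is exact there
def normB_inner (indices : List Int) : List Int :=
  indices.map (fun x =>
    ((PySem.Set.ofList
        (PySem.List.slice indices none
          (some (((PySem.List.index? indices x).getD 0 : Nat) : Int)))).length : Int))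

def normalize_indices_alt (cluster_indices : List (List Int)) : List (List Int) :=
  cluster_indices.map normB_inner

-- ===== PRECONDITION & SPEC =====
def Spec_normalize_indices (cluster_indices : List (List Int)) (out : List (List Int)) : Prop := out = normalize_indices_alt cluster_indices
instance (cluster_indices : List (List Int)) (out : List (List Int)) : Decidable (Spec_normalize_indices cluster_indices out) := by unfold Spec_normalize_indices; infer_instance

-- ===== CLAIM (what is proved, stated in full; the proofs are below) =====
def Claim_equal_normalize_indices : Prop := ∀ (cluster_indices : List (List Int)), Dom_normalize_indices cluster_indices → Spec_normalize_indices cluster_indices (normalize_indices cluster_indices)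

-- ===== LEMMAS AND PROOFS =====

-- the common reference value: each element mapped to the rank of its first occurrence
def refNorm (l : List Int) : List Int :=
  l.map (fun x => ((PySem.List.dedup l).idxOf x : Int))

-- dedup of an extension: appending one element
lemma dedup_append_singleton (l : List Int) (a : Int) :
    PySem.List.dedup (l ++ [a]) =
      if a ∈ l then PySem.List.dedup l else PySem.List.dedup l ++ [a] := by
  have h : PySem.List.dedup (l ++ [a]) = PySem.Set.add (PySem.List.dedup l) a := by
    simp [PySem.List.dedup_eq_ofList, PySem.Set.ofList_eq_foldl]
  rw [h]
  by_cases ha : a ∈ l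
  · simp [PySem.Set.add, PySem.Set.contains, ha]
  · simp [PySem.Set.add, PySem.Set.contains, ha]

-- first-occurrence rank is stable under extending the list on the right
lemma idxOf_dedup_stable (m : List Int) : ∀ (l : List Int) (x : Int), x ∈ l →
    (PySem.List.dedup (l ++ m)).idxOf x = (PySem.List.dedup l).idxOf x := by
  induction m with
  | nil => intro l x _; simp
  | cons a m' ih =>
    intro l x hx
    have h1 : l ++ a :: m' = (l ++ [a]) ++ m' := by simp
    rw [h1, ih (l ++ [a]) x (by simp [hx]), dedup_append_singleton]
    by_cases ha : a ∈ l
    · rw [if_pos ha]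
    · have hxd : x ∈ PySem.List.dedup l := (PySem.List.mem_dedup l x).2 hx
      rw [if_neg ha]
      exact List.idxOf_append_of_mem hxd

lemma idxOf_append_self (u : List Int) (x : Int) (h : x ∉ u) :
    (u ++ [x]).idxOf x = u.length := by
  rw [List.idxOf_append]; simp [List.idxOf_eq_length_iff.2 h]

-- the closed form: (dedup l).idxOf x = number of distinct values before x's first occurrence
lemma idxOf_dedup_eq_length_dedup_take (p suf : List Int) (x : Int) (hx : x ∉ p) :
    (PySem.List.dedup (p ++ x :: suf)).idxOf x = (PySem.List.dedup p).length := by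
  have h1 : p ++ x :: suf = (p ++ [x]) ++ suf := by simp
  rw [h1, idxOf_dedup_stable suf (p ++ [x]) x (by simp), dedup_append_singleton, if_neg hx,
      idxOf_append_self _ _ (fun hm => hx ((PySem.List.mem_dedup p x).1 hm))]

lemma normB_inner_eq_ref (l : List Int) : normB_inner l = refNorm l := by
  unfold normB_inner refNorm
  apply List.map_congr_left
  intro x hx
  obtain ⟨k, hk⟩ := (PySem.List.index?_isSome_iff l x).2 hx |> Option.isSome_iff_exists.1
  obtain ⟨p, suf, hsplit, hlen, hnp⟩ := (PySem.List.index?_eq_some_iff l x k).1 hk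
  rw [hk, Option.getD_some, PySem.List.slice_to_natCast, hsplit, ← hlen,
      List.take_left, ← PySem.List.dedup_eq_ofList,
      idxOf_dedup_eq_length_dedup_take p suf x hnp]

-- A's loop invariant
lemma aLoop : ∀ (r p acc : List Int) (d : PySem.Dict Int Int) (n : Int),
    (∀ x, d.contains x = decide (x ∈ p)) →
    (∀ x ∈ p, d.getD x 0 = ((PySem.List.dedup p).idxOf x : Int)) →
    n = ((PySem.List.dedup p).length : Int) →
    (r.foldl stepA (d, n, acc)).2.2 =
      acc ++ r.map (fun x => ((PySem.List.dedup (p ++ r)).idxOf x : Int)) := by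
  intro r
  induction r with
  | nil => intro p acc d n _ _ _; simp
  | cons x r' ih =>
    intro p acc d n hc hg hn
    simp only [List.foldl_cons]
    by_cases hx : x ∈ p
    · have hcx : d.contains x = true := by rw [hc]; simp [hx]
      have hdd : PySem.List.dedup (p ++ [x]) = PySem.List.dedup p := by
        rw [dedup_append_singleton]; simp [hx]
      have hstep : stepA (d, n, acc) x =
          (d, n, acc ++ [((PySem.List.dedup p).idxOf x : Int)]) := by
        simp [stepA, hcx, hg x hx]
      rw [hstep]
      have hmem : ∀ y : Int, (y ∈ p ++ [x]) ↔ y ∈ p := by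
        intro y
        simp only [List.mem_append, List.mem_singleton]
        exact ⟨fun h => h.elim id (fun he => by rw [he]; exact hx), Or.inl⟩
      have this2 := ih (p ++ [x]) (acc ++ [((PySem.List.dedup p).idxOf x : Int)]) d n
        (by intro y; rw [hc]; simp [hmem y])
        (by intro y hy; rw [hdd]; exact hg y ((hmem y).1 hy))
        (by rw [hdd]; exact hn)
      have hst : (p ++ [x]) ++ r' = p ++ x :: r' := by simp
      rw [hst] at this2
      have hv : ((PySem.List.dedup (p ++ x :: r')).idxOf x : Int) =
          ((PySem.List.dedup p).idxOf x : Int) := by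
        rw [idxOf_dedup_stable (x :: r') p x hx]
      rw [this2, List.map_cons, hv]
      simp
    · have hcx : d.contains x = false := by rw [hc]; simp [hx]
      have hxd : x ∉ PySem.List.dedup p := fun hm => hx ((PySem.List.mem_dedup p x).1 hm)
      have hdd : PySem.List.dedup (p ++ [x]) = PySem.List.dedup p ++ [x] := by
        rw [dedup_append_singleton]; simp [hx]
      have hstep : stepA (d, n, acc) x = (d.insert x n, n + 1, acc ++ [n]) := by
        simp [stepA, hcx, PySem.Dict.getD_insert_self]
      rw [hstep]
      have this2 := ih (p ++ [x]) (acc ++ [n]) (d.insert x n) (n + 1)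
        (by intro y
            rw [PySem.Dict.contains_insert, hc]
            by_cases hya : y = x <;> simp [hya])
        (by intro y hy
            rw [hdd]
            rcases List.mem_append.1 hy with h | h
            · have hyx : y ≠ x := fun he => hx (he ▸ h)
              rw [PySem.Dict.getD_insert_of_ne _ _ _ hyx, hg y h,
                  List.idxOf_append_of_mem ((PySem.List.mem_dedup p y).2 h)]
            · simp only [List.mem_singleton] at h; subst h
              rw [PySem.Dict.getD_insert_self, hn,
                  idxOf_append_self _ _ hxd])
        (by rw [hdd, hn]; push_cast [List.length_append, List.length_singleton]; ring)
      have hst : (p ++ [x]) ++ r' = p ++ x :: r' := by simp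
      rw [hst] at this2
      have hv : ((PySem.List.dedup (p ++ x :: r')).idxOf x : Int) = n := by
        rw [idxOf_dedup_eq_length_dedup_take p r' x hx, hn]
      rw [this2, List.map_cons, hv]
      simp

lemma normA_inner_eq_ref (l : List Int) : normA_inner l = refNorm l := by
  unfold normA_inner refNorm
  have := aLoop l [] [] PySem.Dict.empty 0
    (by intro x; simp [PySem.Dict.contains_empty])
    (by intro x hx; cases hx)
    (by simp [PySem.List.dedup])
  simpa using this

-- ===== VERDICT (by name: the statement is the Claim_ definition above) =====
theorem normalize_indices_spec : Claim_equal_normalize_indices := by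
  intro ci _
  unfold Spec_normalize_indices normalize_indices normalize_indices_alt
  rw [PySem.List.foldl_append_singleton_eq_map]
  simp only [List.nil_append]
  apply List.map_congr_left
  intro l _
  rw [normA_inner_eq_ref, normB_inner_eq_ref]
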